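-- pv_equiv track=rewrite | github.com/hugoxxxx/GT23_Workflow | core/renderer.py | _get_zeiss_colors
-- ===== SOURCE A (Python) =====
-- def _get_zeiss_colors(text, base_color):
--     colors = [base_color] * len(text)
--     zeiss_red = (237, 31, 37)
--     i = 0
--     while i < len(text) - 1:
--         if text[i:i+2] == "T*":
--             colors[i] = zeiss_red
--             colors[i+1] = zeiss_red
--             i += 2
--         else:
--             i += 1
--     return colors
-- ===== SOURCE B (Python) =====
-- def _get_zeiss_colors(text, base_color):
--     zeiss_red = (237, 31, 37)
--     return [zeiss_red
--             if text[j:j + 2] == "T*" or (j > 0 and text[j - 1:j + 1] == "T*")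
--             else base_color
--             for j in range(len(text))]
-- ===== Notes on version B (the rewrite author's own statement) =====
-- stated objective: simpler
-- what changed: Replaced the stateful while-scan with variable step and in-place mutation by a single pure comprehension that computes each position's color pointwise (red iff a 'T*' match starts at j or at j-1, which is exact because matches cannot overlap).
import Mathlib
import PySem

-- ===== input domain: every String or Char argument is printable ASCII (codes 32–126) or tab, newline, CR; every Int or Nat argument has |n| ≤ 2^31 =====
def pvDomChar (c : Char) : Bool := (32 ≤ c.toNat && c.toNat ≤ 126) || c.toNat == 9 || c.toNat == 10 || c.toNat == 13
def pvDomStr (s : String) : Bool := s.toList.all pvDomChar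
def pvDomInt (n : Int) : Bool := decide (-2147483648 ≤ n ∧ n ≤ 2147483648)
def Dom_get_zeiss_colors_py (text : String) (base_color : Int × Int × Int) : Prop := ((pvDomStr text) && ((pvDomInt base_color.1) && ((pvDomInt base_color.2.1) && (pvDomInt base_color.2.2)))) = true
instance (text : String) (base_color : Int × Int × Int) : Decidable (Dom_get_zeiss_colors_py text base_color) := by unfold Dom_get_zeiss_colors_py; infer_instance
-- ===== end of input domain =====

-- B replaces A's stateful while-scan (variable step, in-place mutation) by a single pure
-- pointwise comprehension; objective: simpler (matches cannot overlap, so pointwise is exact).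

-- ===== PORT A =====
-- while-loop of A: i advances by 2 after a match, else by 1
def pvLoopA (cs : List Char) (red : Int × Int × Int)
    (colors : List (Int × Int × Int)) (i : Nat) : List (Int × Int × Int) :=
  if i < cs.length - 1 then
    if PySem.List.slice cs (some (i : Int)) (some ((i : Int) + 2)) = ['T', '*'] then
      pvLoopA cs red ((colors.set i red).set (i + 1) red) (i + 2)
    else
      pvLoopA cs red colors (i + 1)
  else colors
termination_by cs.length - i
decreasing_by all_goals omega

def get_zeiss_colors_py (text : String) (base_color : Int × Int × Int) : List (Int × Int × Int) :=
  pvLoopA text.toList (237, 31, 37) (List.replicate text.toList.length base_color) 0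

-- ===== PORT B =====
def get_zeiss_colors_py_alt (text : String) (base_color : Int × Int × Int) : List (Int × Int × Int) :=
  let cs := text.toList
  (List.range cs.length).map (fun (j : Nat) =>
    if PySem.List.slice cs (some (j : Int)) (some ((j : Int) + 2)) = ['T', '*']
        ∨ (0 < j ∧ PySem.List.slice cs (some ((j : Int) - 1)) (some ((j : Int) + 1)) = ['T', '*'])
    then (237, 31, 37) else base_color)

-- ===== PRECONDITION & SPEC =====
def Spec_get_zeiss_colors_py (text : String) (base_color : Int × Int × Int) (out : List (Int × Int × Int)) : Prop := out = get_zeiss_colors_py_alt text base_color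
instance (text : String) (base_color : Int × Int × Int) (out : List (Int × Int × Int)) : Decidable (Spec_get_zeiss_colors_py text base_color out) := by unfold Spec_get_zeiss_colors_py; infer_instance

-- ===== CLAIM (what is proved, stated in full; the proofs are below) =====
def Claim_equal_get_zeiss_colors_py : Prop := ∀ (text : String) (base_color : Int × Int × Int), Dom_get_zeiss_colors_py text base_color → Spec_get_zeiss_colors_py text base_color (get_zeiss_colors_py text base_color)

-- ===== LEMMAS AND PROOFS =====

-- a 'T*' match starts at position j
abbrev pvM (cs : List Char) (j : Nat) : Prop := cs[j]? = some 'T' ∧ cs[j + 1]? = some '*'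

-- pointwise rule of B
abbrev pvF (cs : List Char) (red base : Int × Int × Int) (j : Nat) : Int × Int × Int :=
  if pvM cs j ∨ (0 < j ∧ pvM cs (j - 1)) then red else base

lemma pv_slice2_iff (cs : List Char) (a : Nat) :
    PySem.List.slice cs (some (a : Int)) (some ((a : Int) + 2)) = ['T', '*']
      ↔ pvM cs a := by
  have h : ((a : Int) + 2) = ((a + 2 : Nat) : Int) := by push_cast; ring
  rw [h, PySem.List.slice_natCast]
  have h2 : a + 2 - a = 2 := by omega
  rw [h2]
  have e0 : cs[a]? = (cs.drop a)[0]? := by simp [List.getElem?_drop]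
  have e1 : cs[a + 1]? = (cs.drop a)[1]? := by simp [List.getElem?_drop]
  unfold pvM
  rw [e0, e1]
  generalize cs.drop a = l
  match l with
  | [] => simp
  | [x] => simp
  | x :: y :: t => simp [List.take]

lemma pvF_red_of_M (cs : List Char) (red base : Int × Int × Int) (i : Nat)
    (hm : pvM cs i) : pvF cs red base i = red := if_pos (Or.inl hm)

lemma pvF_red_succ (cs : List Char) (red base : Int × Int × Int) (i : Nat)
    (hm : pvM cs i) : pvF cs red base (i + 1) = red :=
  if_pos (Or.inr ⟨Nat.succ_pos i, by simpa using hm⟩)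

lemma pvF_base (cs : List Char) (red base : Int × Int × Int) (i : Nat)
    (h1 : ¬ pvM cs i) (h2 : 0 < i → ¬ pvM cs (i - 1)) : pvF cs red base i = base := by
  apply if_neg
  rintro (h | ⟨hp, h⟩)
  · exact h1 h
  · exact h2 hp h

lemma pv_set_map_range {α : Type} (n k : Nat) (g : Nat → α) (v : α) :
    ((List.range n).map g).set k v
      = (List.range n).map (fun j => if j = k then v else g j) := by
  apply List.ext_getElem
  · simp
  · intro idx h1 h2
    simp only [List.getElem_set, List.getElem_map, List.getElem_range]
    by_cases h : idx = k
    · subst h; simp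
    · rw [if_neg (fun hh => h hh.symm), if_neg h]

lemma pvLoopA_eq (cs : List Char) (red base : Int × Int × Int) :
    ∀ (k i : Nat), cs.length - i ≤ k → (0 < i → ¬ pvM cs (i - 1)) →
      pvLoopA cs red ((List.range cs.length).map (fun j => if j < i then pvF cs red base j else base)) i
        = (List.range cs.length).map (pvF cs red base) := by
  intro k
  induction k with
  | zero =>
    intro i hk _
    rw [pvLoopA, if_neg (by omega)]
    apply List.map_congr_left
    intro j hj
    simp only [List.mem_range] at hj
    rw [if_pos (by omega)]
  | succ k ih =>
    intro i hk hno
    rw [pvLoopA]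
    by_cases hg : i < cs.length - 1
    · rw [if_pos hg]
      by_cases hm : PySem.List.slice cs (some (i : Int)) (some ((i : Int) + 2)) = ['T', '*']
      · rw [if_pos hm]
        rw [pv_slice2_iff] at hm
        rw [pv_set_map_range, pv_set_map_range]
        have hstep :
            ((List.range cs.length).map (fun j => if j = i + 1 then red else if j = i then red else if j < i then pvF cs red base j else base))
              = (List.range cs.length).map (fun j => if j < i + 2 then pvF cs red base j else base) := by
          apply List.map_congr_left
          intro j hj
          simp only [List.mem_range] at hj
          by_cases h1 : j = i + 1
          · subst h1
            rw [if_pos rfl, if_pos (by omega), pvF_red_succ cs red base i hm]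
          · rw [if_neg h1]
            by_cases h2 : j = i
            · subst h2
              rw [if_pos rfl, if_pos (by omega), pvF_red_of_M cs red base j hm]
            · rw [if_neg h2]
              by_cases hlt : j < i
              · rw [if_pos hlt, if_pos (by omega)]
              · rw [if_neg hlt, if_neg (by omega)]
        rw [hstep]
        apply ih (i + 2) (by omega)
        intro _ hM
        have h2 := hm.2
        have h1 := hM.1
        simp only [show i + 2 - 1 = i + 1 by omega] at h1
        rw [h2] at h1
        simp at h1
      · rw [if_neg hm]
        have hnm : ¬ pvM cs i := fun h => hm ((pv_slice2_iff cs i).mpr h)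
        have hcol :
            ((List.range cs.length).map (fun j => if j < i then pvF cs red base j else base))
              = (List.range cs.length).map (fun j => if j < i + 1 then pvF cs red base j else base) := by
          apply List.map_congr_left
          intro j hj
          by_cases h2 : j = i
          · subst h2
            rw [if_neg (by omega), if_pos (by omega), pvF_base cs red base j hnm hno]
          · by_cases hlt : j < i
            · rw [if_pos hlt, if_pos (by omega)]
            · rw [if_neg hlt, if_neg (by omega)]
        rw [hcol]
        apply ih (i + 1) (by omega)
        intro _
        simpa using hnm
    · rw [if_neg hg]
      apply List.map_congr_left
      intro j hj
      simp only [List.mem_range] at hj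
      by_cases hlt : j < i
      · rw [if_pos hlt]
      · rw [if_neg hlt]
        have hji : j = i := by omega
        subst hji
        have hnone : cs[j + 1]? = none := by
          rw [List.getElem?_eq_none]
          omega
        have hnm : ¬ pvM cs j := by
          rintro ⟨-, h2⟩
          rw [hnone] at h2
          simp at h2
        exact (pvF_base cs red base j hnm hno).symm

lemma pv_alt_eq (text : String) (base : Int × Int × Int) :
    get_zeiss_colors_py_alt text base
      = (List.range text.toList.length).map (pvF text.toList (237, 31, 37) base) := by
  simp only [get_zeiss_colors_py_alt]
  apply List.map_congr_left
  intro j hj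
  have hiff :
      (PySem.List.slice text.toList (some (j : Int)) (some ((j : Int) + 2)) = ['T', '*']
          ∨ (0 < j ∧ PySem.List.slice text.toList (some ((j : Int) - 1)) (some ((j : Int) + 1)) = ['T', '*']))
        ↔ (pvM text.toList j ∨ (0 < j ∧ pvM text.toList (j - 1))) := by
    apply or_congr (pv_slice2_iff text.toList j)
    apply and_congr_right
    intro hp
    rw [show ((j : Int) - 1) = (((j - 1 : Nat)) : Int) by omega,
        show ((j : Int) + 1) = (((j - 1 : Nat)) : Int) + 2 by omega,
        pv_slice2_iff]
  rw [if_congr hiff rfl rfl]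

-- ===== VERDICT (by name: the statement is the Claim_ definition above) =====
theorem get_zeiss_colors_py_spec : Claim_equal_get_zeiss_colors_py := by
  intro text base _
  unfold Spec_get_zeiss_colors_py get_zeiss_colors_py
  have h0 : List.replicate text.toList.length base
      = (List.range text.toList.length).map
          (fun j => if j < 0 then pvF text.toList (237, 31, 37) base j else base) := by
    simp
  rw [h0, pvLoopA_eq text.toList (237, 31, 37) base text.toList.length 0 (by omega) (by omega),
      pv_alt_eq]
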